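-- pv_equiv track=rewrite | github.com/stevemccoy/aoc2024 | py/day20/day20.py | trace_timings
-- ===== SOURCE A (Python) =====
-- def trace_timings(path):
-- 	locations = {}
-- 	cost = 0
-- 	for (x,y,_) in path:
-- 		if (x,y) not in locations:
-- 			locations[(x,y)] = cost
-- 			cost += 1
-- 	return locations
-- ===== SOURCE B (Python) =====
-- def trace_timings(path):
--     remaining = [(x, y) for (x, y, _) in path]
--     out = {}
--     i = 0
--     while remaining:
--         c = remaining[0]
--         out[c] = i
--         remaining = [q for q in remaining if q != c]
--         i += 1
--     return out
-- ===== Notes on version B (the rewrite author's own statement) =====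
-- stated objective: alternative
-- what changed: Replaces A's single pass with a seen-dict and a manual counter by a selection-style loop: repeatedly take the first remaining coordinate, assign it the next index, and filter all its occurrences out of the remaining list.
import Mathlib
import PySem

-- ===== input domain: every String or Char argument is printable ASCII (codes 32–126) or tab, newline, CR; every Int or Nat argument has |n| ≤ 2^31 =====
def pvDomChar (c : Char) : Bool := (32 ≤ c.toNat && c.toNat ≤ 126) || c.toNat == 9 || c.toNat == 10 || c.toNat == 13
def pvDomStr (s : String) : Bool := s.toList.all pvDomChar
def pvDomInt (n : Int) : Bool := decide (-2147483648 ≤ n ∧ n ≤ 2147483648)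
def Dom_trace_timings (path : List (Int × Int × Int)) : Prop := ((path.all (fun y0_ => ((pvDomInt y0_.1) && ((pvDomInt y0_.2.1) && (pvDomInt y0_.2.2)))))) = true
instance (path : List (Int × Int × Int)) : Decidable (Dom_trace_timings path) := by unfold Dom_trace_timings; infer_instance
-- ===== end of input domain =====

-- B is an alternative decomposition (no speed claim): a selection-style loop that repeatedly
-- takes the first remaining coordinate, assigns it the next index, and filters out all its
-- occurrences, instead of A's one pass with a seen-dict and a manual counter.

-- ===== PORT A =====
def ttStep (st : List (Int × Int × Int) × Int) (p : Int × Int × Int) : List (Int × Int × Int) × Int :=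
  if st.1.any (fun t => t.1 == p.1 && t.2.1 == p.2.1) then st
  else (st.1 ++ [(p.1, p.2.1, st.2)], st.2 + 1)

def trace_timings (path : List (Int × Int × Int)) : List (Int × Int × Int) :=
  (path.foldl ttStep ([], 0)).1

-- ===== PORT B =====
-- the while loop: take head of `remaining`, emit it with index i, filter `remaining`
-- (the head q = c itself never passes `q != c`, so filtering the tail is the same filter)
def ttLoop : List (Int × Int) → Int → List (Int × Int × Int)
  | [], _ => []
  | c :: rest, i => (c.1, c.2, i) :: ttLoop (rest.filter (fun q => q != c)) (i + 1)
  termination_by l _ => l.length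
  decreasing_by
    simp only [List.unattach_filter, List.unattach_attach]
    exact Nat.lt_succ_of_le (List.length_filter_le _ _)

def trace_timings_alt (path : List (Int × Int × Int)) : List (Int × Int × Int) :=
  ttLoop (path.map (fun p => (p.1, p.2.1))) 0

-- ===== PRECONDITION & SPEC =====
def Spec_trace_timings (path : List (Int × Int × Int)) (out : List (Int × Int × Int)) : Prop := out = trace_timings_alt path
instance (path : List (Int × Int × Int)) (out : List (Int × Int × Int)) : Decidable (Spec_trace_timings path out) := by unfold Spec_trace_timings; infer_instance

-- ===== CLAIM =====
def Claim_equal_trace_timings : Prop := ∀ (path : List (Int × Int × Int)), Dom_trace_timings path → Spec_trace_timings path (trace_timings path)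

-- ===== LEMMAS AND PROOFS =====
-- first-seen-order deduplication, in the same recursion shape as ttLoop (proof helper only)
def fsd : List (Int × Int) → List (Int × Int)
  | [] => []
  | c :: rest => c :: fsd (rest.filter (fun q => q != c))
  termination_by l => l.length
  decreasing_by
    simp only [List.unattach_filter, List.unattach_attach]
    exact Nat.lt_succ_of_le (List.length_filter_le _ _)

-- the deduped key list paired with indices starting at n (proof helper only)
def ttEnum : List (Int × Int) → Int → List (Int × Int × Int)
  | [], _ => []
  | (x, y) :: ks, n => (x, y, n) :: ttEnum ks (n + 1)

lemma ttEnum_append (ks : List (Int × Int)) (q : Int × Int) (n : Int) :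
    ttEnum (ks ++ [q]) n = ttEnum ks n ++ [(q.1, q.2, n + ks.length)] := by
  induction ks generalizing n with
  | nil => simp [ttEnum]
  | cons a ks ih =>
    obtain ⟨ax, ay⟩ := a
    have harith : n + 1 + (ks.length : Int) = n + ((ks.length : Int) + 1) := by omega
    simp only [ttEnum, ih, List.cons_append, List.length_cons, Nat.cast_add, Nat.cast_one, harith]

lemma ttEnum_mem (ks : List (Int × Int)) (n x y : Int) :
    (ttEnum ks n).any (fun t => t.1 == x && t.2.1 == y) = ks.contains (x, y) := by
  induction ks generalizing n with
  | nil => simp [ttEnum]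
  | cons a ks ih =>
    obtain ⟨ax, ay⟩ := a
    simp only [ttEnum, List.any_cons, List.contains_cons, ih]
    congr 1
    simp [Prod.ext_iff, eq_comm, Bool.beq_eq_decide_eq]

-- A's foldl, started from an arbitrary deduped prefix ks, dedups into ks
lemma tt_main (path : List (Int × Int × Int)) (ks : List (Int × Int)) :
    path.foldl ttStep (ttEnum ks 0, (ks.length : Int)) =
      (ttEnum (path.foldl (fun acc p => if acc.contains (p.1, p.2.1) then acc else acc ++ [(p.1, p.2.1)]) ks) 0,
       ((path.foldl (fun acc p => if acc.contains (p.1, p.2.1) then acc else acc ++ [(p.1, p.2.1)]) ks).length : Int)) := by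
  induction path generalizing ks with
  | nil => simp
  | cons p path ih =>
    simp only [List.foldl_cons, ttStep, ttEnum_mem, List.contains_eq_mem, decide_eq_true_eq] at ih ⊢
    by_cases h : (p.1, p.2.1) ∈ ks
    · simp only [h, if_true]
      exact ih ks
    · simp only [h, if_false]
      have e : ttEnum ks 0 ++ [(p.1, p.2.1, (ks.length : Int))] = ttEnum (ks ++ [(p.1, p.2.1)]) 0 := by
        rw [ttEnum_append]; simp
      have l : ((ks.length : Int) + 1) = (((ks ++ [(p.1, p.2.1)]).length : Int)) := by
        simp
      rw [e, l, ih (ks ++ [(p.1, p.2.1)])]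

-- the left-fold dedup used in tt_main equals fsd of the yet-unseen elements
lemma dfold_fsd (ks : List (Int × Int)) (acc : List (Int × Int)) :
    ks.foldl (fun acc p => if acc.contains p then acc else acc ++ [p]) acc =
      acc ++ fsd (ks.filter (fun q => !acc.contains q)) := by
  induction ks generalizing acc with
  | nil => rw [List.foldl_nil, List.filter_nil, fsd, List.append_nil]
  | cons c ks ih =>
    rw [List.foldl_cons, List.filter_cons]
    by_cases h : acc.contains c = true
    · rw [if_pos h]
      have : (!acc.contains c) = false := by rw [h]; rfl
      rw [this, if_neg (by simp), ih]
    · have hc : acc.contains c = false := eq_false_of_ne_true h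
      rw [if_neg h]
      have : (!acc.contains c) = true := by rw [hc]; rfl
      rw [this, if_pos rfl, fsd, ih (acc ++ [c]), List.filter_filter]
      have hf : ks.filter (fun q => (q != c) && !acc.contains q) =
          ks.filter (fun q => !((acc ++ [c]).contains q)) := by
        apply List.filter_congr
        intro q _
        simp only [List.contains_append, List.contains_cons, List.contains_nil,
          Bool.or_false, Bool.not_or, bne]
        rw [Bool.and_comm]
      rw [hf]
      simp

lemma ttLoop_eq_enum_fsd (n : Nat) (ks : List (Int × Int)) (h : ks.length ≤ n) (i : Int) :
    ttLoop ks i = ttEnum (fsd ks) i := by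
  induction n generalizing ks i with
  | zero =>
    have : ks = [] := List.eq_nil_of_length_eq_zero (Nat.le_zero.mp h)
    subst this
    rw [ttLoop, fsd]
    rfl
  | succ n ih =>
    cases ks with
    | nil =>
      rw [ttLoop, fsd]
      rfl
    | cons c rest =>
      obtain ⟨cx, cy⟩ := c
      rw [ttLoop, fsd]
      simp only [ttEnum]
      rw [ih _ (le_trans (List.length_filter_le _ _) (Nat.lt_succ_iff.mp h))]

-- ===== VERDICT =====
theorem trace_timings_spec : Claim_equal_trace_timings := by
  intro path _
  unfold Spec_trace_timings trace_timings trace_timings_alt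
  have h := tt_main path []
  simp only [ttEnum, List.length_nil, Nat.cast_zero] at h
  have hd := dfold_fsd (path.map (fun p => (p.1, p.2.1))) []
  simp only [List.foldl_map, List.contains_nil, Bool.not_false, List.filter_true,
    List.nil_append] at hd
  rw [h, ttLoop_eq_enum_fsd (path.map (fun p => (p.1, p.2.1))).length _ (le_refl _), ← hd]
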